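-- pv_equiv track=rewrite | github.com/LuxInTenebr1s/polydating_bot | polydating_bot/helpers.py | dict_strip
-- ===== SOURCE A (Python) =====
-- from typing import Union, Dict, Optional
--
-- def dict_strip(data: Dict) -> Dict:
--     keys = []
--     for key, val in data.items():
--         if not val:
--            keys.append(key)
--     for key in keys:
--         del data[key]
--     return data
-- ===== SOURCE B (Python) =====
-- def dict_strip(data):
--     for _ in range(len(data)):
--         key = next(iter(data))
--         val = data.pop(key)
--         if val:
--             data[key] = val
--     return data
-- ===== Notes on version B (the rewrite author's own statement) =====
-- stated objective: alternative
-- what changed: Replaces A's two-stage 'collect every falsy key, then delete them' pass with a queue-rotation: len(data) times pop the current first entry and re-insert it at the end only if truthy, so falsy entries drop out and truthy ones cycle back in their original order (same in-place mutation and object identity).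
import Mathlib
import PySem

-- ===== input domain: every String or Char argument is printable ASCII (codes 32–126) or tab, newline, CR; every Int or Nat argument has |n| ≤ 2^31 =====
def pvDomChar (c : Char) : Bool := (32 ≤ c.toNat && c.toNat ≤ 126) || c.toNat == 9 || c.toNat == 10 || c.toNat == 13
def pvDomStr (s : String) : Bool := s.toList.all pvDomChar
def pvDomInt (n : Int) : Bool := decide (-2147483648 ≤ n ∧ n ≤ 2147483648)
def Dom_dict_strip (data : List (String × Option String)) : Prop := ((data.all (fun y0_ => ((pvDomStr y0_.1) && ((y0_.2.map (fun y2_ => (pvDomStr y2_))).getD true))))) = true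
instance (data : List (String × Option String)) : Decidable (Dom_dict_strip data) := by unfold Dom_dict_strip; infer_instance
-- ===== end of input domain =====

-- B strips falsy entries by rotating the dict through itself (pop the first entry len(data)
-- times, re-inserting truthy ones at the end) instead of A's collect-falsy-keys-then-delete
-- batch pass; same in-place result, order and identity.


-- truthiness of an Optional[str] value: None and "" are falsy
def pvFalsy (v : Option String) : Bool :=
  match v with
  | none => true
  | some s => s == ""

-- ===== PORT A =====
-- keys = []; for key, val in data.items(): if not val: keys.append(key)
-- for key in keys: del data[key]
def dict_strip (data : List (String × Option String)) : List (String × Option String) :=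
  let keys := data.foldl (fun ks kv => if pvFalsy kv.2 then ks ++ [kv.1] else ks) ([] : List String)
  keys.foldl (fun d k => d.filter (fun kv => kv.1 != k)) data

-- ===== PORT B =====
-- one rotation step: key = next(iter(data)); val = data.pop(key); if val: data[key] = val
-- ([] branch is a totality guard only: the loop below never reaches an empty dict)
def pvStep (d : List (String × Option String)) : List (String × Option String) :=
  match d with
  | [] => d
  | kv :: rest => if pvFalsy kv.2 then rest else rest ++ [kv]

-- for _ in range(len(data)): <rotation step>; return data
def dict_strip_alt (data : List (String × Option String)) : List (String × Option String) :=
  (List.range data.length).foldl (fun d _ => pvStep d) data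

-- ===== PRECONDITION & SPEC =====
-- Pre_ states the dict-encoding invariant: the association list represents a Python dict,
-- so its keys are distinct (a duplicate-key list corresponds to no dict input of A).
def Pre_dict_strip (data : List (String × Option String)) : Prop :=
  (data.map Prod.fst).Nodup
instance (data : List (String × Option String)) : Decidable (Pre_dict_strip data) := by unfold Pre_dict_strip; infer_instance

def pvWitness_dict_strip : (List (String × Option String)) :=
  [("a", some "x"), ("b", none), ("c", some "")]

def Spec_dict_strip (data : List (String × Option String)) (out : List (String × Option String)) : Prop := out = dict_strip_alt data
instance (data : List (String × Option String)) (out : List (String × Option String)) : Decidable (Spec_dict_strip data out) := by unfold Spec_dict_strip; infer_instance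

-- ===== CLAIM (what is proved, stated in full; the proofs are below) =====
def Claim_equal_dict_strip : Prop := ∀ (data : List (String × Option String)), Dom_dict_strip data → Pre_dict_strip data → Spec_dict_strip data (dict_strip data)

-- ===== LEMMAS AND PROOFS =====

-- deleting each key of ks in turn is filtering by "key not in ks"
lemma foldl_del_eq_filter (ks : List String) (d : List (String × Option String)) :
    ks.foldl (fun d k => d.filter (fun kv => kv.1 != k)) d
      = d.filter (fun kv => !ks.contains kv.1) := by
  induction ks generalizing d with
  | nil => simp
  | cons k ks ih =>
      simp only [List.foldl_cons, ih, List.filter_filter]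
      apply List.filter_congr
      intro kv _
      by_cases h : kv.1 = k <;> simp [h]

-- in a nodup-key list, a key of a member is a collected falsy key iff the member's value is falsy
lemma mem_keys_iff (data : List (String × Option String)) (hnd : (data.map Prod.fst).Nodup)
    (kv : String × Option String) (hmem : kv ∈ data) :
    ((data.filter (fun kv => pvFalsy kv.2)).map Prod.fst).contains kv.1 = pvFalsy kv.2 := by
  by_cases hf : pvFalsy kv.2 = true
  · simp only [hf, List.contains_eq_mem, decide_eq_true_eq]
    exact List.mem_map.mpr ⟨kv, List.mem_filter.mpr ⟨hmem, hf⟩, rfl⟩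
  · simp only [hf]
    simp only [List.contains_eq_mem, decide_eq_false_iff_not]
    intro hcon
    obtain ⟨kw, hkw, hEq⟩ := List.mem_map.mp hcon
    obtain ⟨hkwmem, hkwf⟩ := List.mem_filter.mp hkw
    have : kw = kv := List.inj_on_of_nodup_map hnd hkwmem hmem hEq
    subst this
    exact hf hkwf

-- A computes filter-by-truthy on nodup-key lists
lemma dict_strip_eq_filter (data : List (String × Option String)) (hnd : (data.map Prod.fst).Nodup) :
    dict_strip data = data.filter (fun kv => !pvFalsy kv.2) := by
  unfold dict_strip
  simp only [PySem.List.foldl_append_if (fun kv => pvFalsy kv.2) Prod.fst, List.nil_append,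
    foldl_del_eq_filter]
  apply List.filter_congr
  intro kv hmem
  rw [mem_keys_iff data hnd kv hmem]

-- k rotation steps move the first k entries' truthy survivors to the back
lemma iter_rot (l : List (String × Option String)) (k : Nat) (hk : k ≤ l.length) :
    (List.range k).foldl (fun d _ => pvStep d) l
      = l.drop k ++ (l.take k).filter (fun kv => !pvFalsy kv.2) := by
  induction k with
  | zero => simp
  | succ k ih =>
      have hk' : k < l.length := hk
      rw [List.range_succ, List.foldl_append, ih (Nat.le_of_lt hk')]
      simp only [List.foldl_cons, List.foldl_nil]
      rw [List.drop_eq_getElem_cons hk', List.cons_append]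
      rw [List.take_add_one, List.getElem?_eq_getElem hk']
      simp only [pvStep, Option.toList_some, List.filter_append]
      by_cases hf : pvFalsy (l[k]).2 = true
      · simp [hf]
      · simp [hf]

-- B's rotation loop computes filter-by-truthy (no key hypothesis needed)
lemma dict_strip_alt_eq_filter (data : List (String × Option String)) :
    dict_strip_alt data = data.filter (fun kv => !pvFalsy kv.2) := by
  unfold dict_strip_alt
  rw [iter_rot data data.length (Nat.le_refl _)]
  simp

-- ===== VERDICT (by name: the statement is the Claim_ definition above) =====
theorem dict_strip_spec : Claim_equal_dict_strip := by
  intro data _ hpre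
  unfold Spec_dict_strip
  rw [dict_strip_eq_filter data hpre, dict_strip_alt_eq_filter data]
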